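-- pv_equiv track=rewrite | github.com/shmily1012/pypcie | pypcie/cli.py | _should_display
-- ===== SOURCE A (Python) =====
-- def _should_display(node, children, matched, cache):
--     if matched is None:
--         return True
--     if node in cache:
--         return cache[node]
--     if node in matched:
--         cache[node] = True
--         return True
--     for child in children.get(node, []):
--         if _should_display(child, children, matched, cache):
--             cache[node] = True
--             return True
--     cache[node] = False
--     return False
-- ===== SOURCE B (Python) =====
-- def _should_display(node, children, matched, cache):
--     if matched is None:
--         return True
--     if node in cache:
--         return cache[node]
--     seen = {node}
--     queue = [node]
--     while queue:
--         cur = queue.pop(0)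
--         if cur in cache:
--             if cache[cur]:
--                 cache[node] = True
--                 return True
--             continue
--         if cur in matched:
--             cache[node] = True
--             return True
--         for ch in children.get(cur, []):
--             if ch not in seen:
--                 seen.add(ch)
--                 queue.append(ch)
--     cache[node] = False
--     return False
-- ===== Notes on version B (the rewrite author's own statement) =====
-- stated objective: alternative
-- what changed: A's memoized recursive depth-first search (which writes every visited descendant into cache and recurses on the call stack) is replaced by an iterative work-list traversal: a queue plus a visited set, popping nodes, succeeding on a cached-true or matched node, pruning cached-false nodes, and enqueuing unseen children; only the queried node is written back to cache.
-- outside the precondition, e.g. on _should_display('a', {'a': ['b', 'a']}, {'b'}, {}): A returns True, B returns True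
import Mathlib
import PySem

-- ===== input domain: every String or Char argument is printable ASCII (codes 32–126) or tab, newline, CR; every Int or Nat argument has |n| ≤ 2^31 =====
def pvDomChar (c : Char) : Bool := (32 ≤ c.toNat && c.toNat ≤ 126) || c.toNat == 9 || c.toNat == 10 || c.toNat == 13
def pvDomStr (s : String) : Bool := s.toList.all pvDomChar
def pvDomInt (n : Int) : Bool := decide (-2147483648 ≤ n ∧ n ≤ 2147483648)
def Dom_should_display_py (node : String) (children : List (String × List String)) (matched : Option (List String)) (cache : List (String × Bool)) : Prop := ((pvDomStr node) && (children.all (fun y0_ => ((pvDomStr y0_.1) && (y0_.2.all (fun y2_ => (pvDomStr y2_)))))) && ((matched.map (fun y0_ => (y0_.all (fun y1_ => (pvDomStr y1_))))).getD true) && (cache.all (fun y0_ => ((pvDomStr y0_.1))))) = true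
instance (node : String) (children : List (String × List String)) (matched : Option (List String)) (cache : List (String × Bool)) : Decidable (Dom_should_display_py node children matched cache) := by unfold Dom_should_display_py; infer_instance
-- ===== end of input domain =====

-- B replaces A's memoized recursive DFS by an iterative BFS work-list with a visited set
-- (no recursion, terminates even on cyclic graphs); return-value equivalence only: A caches
-- every visited descendant in `cache`, B writes only cache[node].

-- ===== PORT A =====
-- first-match association-list lookup (the convention's dict lookup; also `k in d`)
def pvGet? {β : Type} (c : List (String × β)) (k : String) : Option β :=
  (c.find? (fun p => p.1 == k)).map (·.2)

-- children.get(x, [])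
def pvChildren (children : List (String × List String)) (x : String) : List String :=
  (pvGet? children x).getD []

-- Fueled transliteration of A's recursion (the `matched is None` branch returns before any
-- recursion, so the recursive part is over a fixed list m).  The mutated dict `cache` is
-- threaded through; `cache[x] = b` is modelled by consing (first-match lookup sees the
-- overwrite exactly like Python's dict).  Fuel exhaustion (= A's divergence) yields none.
mutual
def pvGoA (children : List (String × List String)) (m : List String)
    (n : Nat) (c : List (String × Bool)) (x : String) :
    Option (Bool × List (String × Bool)) :=
  match n with
  | 0 => none
  | Nat.succ n =>
    match pvGet? c x with
    | some b => some (b, c)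
    | none =>
      if x ∈ m then some (true, (x, true) :: c)
      else pvGoAL children m n c (pvChildren children x) x
termination_by (n, 0)

def pvGoAL (children : List (String × List String)) (m : List String)
    (n : Nat) (c : List (String × Bool)) (ys : List String) (x : String) :
    Option (Bool × List (String × Bool)) :=
  match ys with
  | [] => some (false, (x, false) :: c)
  | y :: ys =>
    match pvGoA children m n c y with
    | none => none
    | some (true, c') => some (true, (x, true) :: c')
    | some (false, c') => pvGoAL children m n c' ys x
termination_by (n, ys.length + 1)
end

def should_display_py (node : String) (children : List (String × List String)) (matched : Option (List String)) (cache : List (String × Bool)) : Bool :=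
  match matched with
  | none => true
  | some m =>
    match pvGoA children m (children.length + 1) cache node with
    | some (b, _) => b
    | none => false

-- ===== PORT B =====
-- the queue loop of B: pop from the front; cached-false nodes are pruned, cached-true or
-- matched nodes succeed, otherwise the unseen children are enqueued and marked seen
def pvGoB (children : List (String × List String)) (m : List String)
    (c0 : List (String × Bool)) :
    Nat → List String → PySem.Set String → Option Bool
  | 0, _, _ => none
  | Nat.succ _, [], _ => some false
  | Nat.succ n, x :: rest, seen =>
    match pvGet? c0 x with
    | some b => if b then some true else pvGoB children m c0 n rest seen
    | none =>
      if x ∈ m then some true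
      else
        let st := (pvChildren children x).foldl
          (fun (qs : List String × PySem.Set String) y =>
            if y ∈ qs.2 then qs else (qs.1 ++ [y], PySem.Set.add qs.2 y)) (rest, seen)
        pvGoB children m c0 n st.1 st.2

-- all strings the loop can ever enqueue
def pvUniverse (node : String) (children : List (String × List String)) : List String :=
  node :: children.flatMap (fun p => p.2)

def should_display_py_alt (node : String) (children : List (String × List String)) (matched : Option (List String)) (cache : List (String × Bool)) : Bool :=
  match matched with
  | none => true
  | some m =>
    match pvGet? cache node with
    | some b => b
    | none =>
      match pvGoB children m cache ((pvUniverse node children).length + 1)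
          [node] (PySem.Set.ofList [node]) with
      | some b => b
      | none => false

-- ===== PRECONDITION & SPEC =====
-- pvNoLong children n x = "every successor chain from x leaves the children map in < n steps".
-- This is a shape condition on the input graph only (with n = children.length + 1 it says: no
-- cycle of the children map is reachable from x, since a longer chain must repeat a key); it
-- mentions neither the cache, nor matched, nor any traversal state of the ports — it is the
-- bounded-chain formulation of reachable-acyclicity, the decidable way to state it.
def pvNoLong (children : List (String × List String)) : Nat → String → Bool
  | 0, _ => false
  | Nat.succ n, x => (pvChildren children x).all (fun y => pvNoLong children n y)

-- Pre_ excludes inputs on which A's unmemoized recursion can run into a cycle of the children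
-- map reachable from node: there A either diverges (RecursionError) or returns only because a
-- matched/cache hit happens to occur before the cycle — an accident of traversal order; the
-- first three disjuncts keep the inputs A answers before recursing (matched None, cached node,
-- node itself matched), the last keeps every input whose reachable children graph is acyclic
-- (a successor chain longer than children.length would have to repeat a key).
def Pre_should_display_py (node : String) (children : List (String × List String)) (matched : Option (List String)) (cache : List (String × Bool)) : Prop :=
  matched = none ∨ (pvGet? cache node).isSome = true ∨ node ∈ matched.getD [] ∨
    pvNoLong children (children.length + 1) node = true
instance (node : String) (children : List (String × List String)) (matched : Option (List String)) (cache : List (String × Bool)) : Decidable (Pre_should_display_py node children matched cache) := by unfold Pre_should_display_py; infer_instance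

def pvWitness_should_display_py : String × (List (String × List String)) × Option (List String) × (List (String × Bool)) :=
  ("a", [("a", ["b"])], some ["b"], [])

def Spec_should_display_py (node : String) (children : List (String × List String)) (matched : Option (List String)) (cache : List (String × Bool)) (out : Bool) : Prop := out = should_display_py_alt node children matched cache
instance (node : String) (children : List (String × List String)) (matched : Option (List String)) (cache : List (String × Bool)) (out : Bool) : Decidable (Spec_should_display_py node children matched cache out) := by unfold Spec_should_display_py; infer_instance

-- ===== CLAIM (what is proved, stated in full; the proofs are below) =====
def Claim_equal_should_display_py : Prop := ∀ (node : String) (children : List (String × List String)) (matched : Option (List String)) (cache : List (String × Bool)), Dom_should_display_py node children matched cache → Pre_should_display_py node children matched cache → Spec_should_display_py node children matched cache (should_display_py node children matched cache)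

-- ===== LEMMAS AND PROOFS =====

-- "x should display": a path through nodes that are uncached and unmatched reaches a node
-- that is cached true, or uncached and matched
inductive pvRP (children : List (String × List String)) (m : List String) (c0 : List (String × Bool)) : String → Prop
  | hit (x : String) : pvGet? c0 x = some true → pvRP children m c0 x
  | mat (x : String) : pvGet? c0 x = none → x ∈ m → pvRP children m c0 x
  | step (x y : String) : pvGet? c0 x = none → x ∉ m → y ∈ pvChildren children x →
      pvRP children m c0 y → pvRP children m c0 x

-- reachable from node through expanded (uncached, unmatched) nodes
inductive pvRF (children : List (String × List String)) (m : List String) (c0 : List (String × Bool)) (node : String) : String → Prop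
  | base : pvRF children m c0 node node
  | step (x y : String) : pvRF children m c0 node x → pvGet? c0 x = none → x ∉ m →
      y ∈ pvChildren children x → pvRF children m c0 node y

theorem pvGet?_cons {β : Type} (k : String) (v : β) (c : List (String × β)) (z : String) :
    pvGet? ((k, v) :: c) z = if k = z then some v else pvGet? c z := by
  by_cases h : k = z <;> simp [pvGet?, h]

theorem pvGet?_append_none {β : Type} (p c0 : List (String × β)) (x : String)
    (h : pvGet? (p ++ c0) x = none) : pvGet? c0 x = none := by
  induction p with
  | nil => simpa using h
  | cons hd tl ih =>
    obtain ⟨k, v⟩ := hd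
    rw [List.cons_append, pvGet?_cons] at h
    by_cases hk : k = x
    · simp [hk] at h
    · simp [hk] at h; exact ih h

theorem pvNotRP_of_false (children : List (String × List String)) (m : List String)
    (c0 : List (String × Bool)) (x : String) (h : pvGet? c0 x = some false) :
    ¬ pvRP children m c0 x := by
  intro hr
  cases hr with
  | hit _ h2 => rw [h] at h2; simp at h2
  | mat _ h2 _ => rw [h] at h2; simp at h2
  | step _ y h2 _ _ _ => rw [h] at h2; simp at h2

def pvSound (children : List (String × List String)) (m : List String)
    (c0 c : List (String × Bool)) : Prop :=
  ∀ x b, pvGet? c x = some b →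
    ((b = true → pvRP children m c0 x) ∧ (b = false → ¬ pvRP children m c0 x))

def pvExt (c0 c : List (String × Bool)) : Prop := ∃ p, c = p ++ c0

theorem pvSound_self (children : List (String × List String)) (m : List String)
    (c0 : List (String × Bool)) : pvSound children m c0 c0 := by
  intro x b h
  constructor
  · intro hb; exact pvRP.hit x (hb ▸ h)
  · intro hb; exact pvNotRP_of_false children m c0 x (hb ▸ h)

theorem pvSound_cons (children : List (String × List String)) (m : List String)
    (c0 c : List (String × Bool)) (x : String) (b : Bool)
    (hs : pvSound children m c0 c)
    (hb : (b = true → pvRP children m c0 x) ∧ (b = false → ¬ pvRP children m c0 x)) :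
    pvSound children m c0 ((x, b) :: c) := by
  intro z b' hz
  rw [pvGet?_cons] at hz
  by_cases hxz : x = z
  · simp [hxz] at hz; exact hz ▸ hxz ▸ hb
  · simp [hxz] at hz; exact hs z b' hz

theorem pvExt_cons (c0 c : List (String × Bool)) (x : String) (b : Bool)
    (h : pvExt c0 c) : pvExt c0 ((x, b) :: c) := by
  obtain ⟨p, rfl⟩ := h; exact ⟨(x, b) :: p, rfl⟩

-- master lemma for A's recursion: given sound cache state and chain-length bound, it returns,
-- the cache stays sound, and the boolean decides pvRP
theorem pvGoA_master (children : List (String × List String)) (m : List String)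
    (c0 : List (String × Bool)) :
    ∀ n (c : List (String × Bool)) (x : String),
      pvNoLong children n x = true → pvSound children m c0 c → pvExt c0 c →
      ∃ b c', pvGoA children m n c x = some (b, c') ∧
        pvSound children m c0 c' ∧ pvExt c0 c' ∧
        (b = true → pvRP children m c0 x) ∧ (b = false → ¬ pvRP children m c0 x) := by
  intro n
  induction n with
  | zero => intro c x h; simp [pvNoLong] at h
  | succ n ih =>
    intro c x hnl hs he
    rw [pvGoA]
    cases hc : pvGet? c x with
    | some b =>
      exact ⟨b, c, rfl, hs, he, hs x b hc⟩
    | none =>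
      have hc0 : pvGet? c0 x = none := by
        obtain ⟨p, rfl⟩ := he; exact pvGet?_append_none p c0 x hc
      by_cases hm : x ∈ m
      · refine ⟨true, (x, true) :: c, by simp [hm], ?_, pvExt_cons _ _ _ _ he, ?_, by simp⟩
        · exact pvSound_cons _ _ _ _ _ _ hs ⟨fun _ => pvRP.mat x hc0 hm, by simp⟩
        · intro _; exact pvRP.mat x hc0 hm
      · simp only [hm, if_false]
        rw [pvNoLong] at hnl
        -- inner induction over the (suffix of the) child list
        have key : ∀ (ys : List String) (c : List (String × Bool)),
            pvSound children m c0 c → pvExt c0 c →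
            (∀ y ∈ ys, y ∈ pvChildren children x) →
            (∀ y ∈ ys, pvNoLong children n y = true) →
            (∀ y ∈ pvChildren children x, y ∈ ys ∨ ¬ pvRP children m c0 y) →
            ∃ b c', pvGoAL children m n c ys x = some (b, c') ∧
              pvSound children m c0 c' ∧ pvExt c0 c' ∧
              (b = true → pvRP children m c0 x) ∧ (b = false → ¬ pvRP children m c0 x) := by
          intro ys
          induction ys with
          | nil =>
            intro c hs he _ _ hdone
            have hnrp : ¬ pvRP children m c0 x := by
              intro hr
              cases hr with
              | hit _ h2 => rw [hc0] at h2; simp at h2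
              | mat _ _ h2 => exact hm h2
              | step _ y _ _ hy hry =>
                rcases hdone y hy with h | h
                · simp at h
                · exact h hry
            exact ⟨false, (x, false) :: c, by rw [pvGoAL],
              pvSound_cons _ _ _ _ _ _ hs ⟨by simp, fun _ => hnrp⟩,
              pvExt_cons _ _ _ _ he, by simp, fun _ => hnrp⟩
          | cons y ys ihys =>
            intro c hs he hsub hnly hdone
            obtain ⟨by_, cy, heq, hsy, hey, hty, hfy⟩ :=
              ih c y (hnly y (by simp)) hs he
            rw [pvGoAL, heq]
            cases by_ with
            | true =>
              have hrx : pvRP children m c0 x :=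
                pvRP.step x y hc0 hm (hsub y (by simp)) (hty rfl)
              exact ⟨true, (x, true) :: cy, rfl,
                pvSound_cons _ _ _ _ _ _ hsy ⟨fun _ => hrx, by simp⟩,
                pvExt_cons _ _ _ _ hey, fun _ => hrx, by simp⟩
            | false =>
              refine ihys cy hsy hey (fun z hz => hsub z (by simp [hz]))
                (fun z hz => hnly z (by simp [hz])) ?_
              intro z hz
              rcases hdone z hz with h | h
              · rcases List.mem_cons.mp h with rfl | h
                · exact Or.inr (hfy rfl)
                · exact Or.inl h
              · exact Or.inr h
        refine key (pvChildren children x) c hs he (fun y hy => hy) ?_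
          (fun y hy => Or.inl hy)
        intro y hy
        exact (List.all_eq_true.mp hnl) y hy

-- ===== B-side lemmas =====

theorem pvRF_RP (children : List (String × List String)) (m : List String)
    (c0 : List (String × Bool)) (node : String) :
    ∀ w, pvRF children m c0 node w → pvRP children m c0 w → pvRP children m c0 node := by
  intro w hrf
  induction hrf with
  | base => exact fun h => h
  | step x y _ hc hm hy ih =>
    intro hrpy
    exact ih (pvRP.step x y hc hm hy hrpy)

-- a processed node: pruned (cached false) or expanded with all children already seen
def pvDone (children : List (String × List String)) (m : List String)
    (c0 : List (String × Bool)) (seen : List String) (z : String) : Prop :=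
  pvGet? c0 z = some false ∨
    (pvGet? c0 z = none ∧ z ∉ m ∧ ∀ y ∈ pvChildren children z, y ∈ seen)

-- if every seen node off the queue is done, any pvRP node already seen yields a pvRP node
-- still on the queue
theorem pvSeen_escape (children : List (String × List String)) (m : List String)
    (c0 : List (String × Bool)) (seen q : List String)
    (hdone : ∀ z ∈ seen, z ∉ q → pvDone children m c0 seen z) :
    ∀ w, pvRP children m c0 w → w ∈ seen → ∃ x ∈ q, pvRP children m c0 x := by
  intro w hrp
  induction hrp with
  | hit x hx =>
    intro hw
    by_cases hq : x ∈ q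
    · exact ⟨x, hq, pvRP.hit x hx⟩
    · rcases hdone x hw hq with h | ⟨h, _, _⟩ <;> rw [hx] at h <;> simp at h
  | mat x hx hm =>
    intro hw
    by_cases hq : x ∈ q
    · exact ⟨x, hq, pvRP.mat x hx hm⟩
    · rcases hdone x hw hq with h | ⟨_, h2, _⟩
      · rw [hx] at h; simp at h
      · exact absurd hm h2
  | step x y hx hm hy hrpy ih =>
    intro hw
    by_cases hq : x ∈ q
    · exact ⟨x, hq, pvRP.step x y hx hm hy hrpy⟩
    · rcases hdone x hw hq with h | ⟨_, _, h3⟩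
      · rw [hx] at h; simp at h
      · exact ih (h3 y hy)

-- the new elements the push-fold appends (to both the queue and the seen set)
def pvNews (s : List String) : List String → List String
  | [] => []
  | y :: l => if y ∈ s then pvNews s l else y :: pvNews (s ++ [y]) l

theorem pvSet_add_of_not_mem (s : PySem.Set String) (y : String) (h : y ∉ s) :
    PySem.Set.add s y = s ++ [y] := by
  simp [PySem.Set.add, PySem.Set.contains, h]

theorem pvFold_eq :
    ∀ (l q s : List String),
      l.foldl (fun (qs : List String × PySem.Set String) y =>
          if y ∈ qs.2 then qs else (qs.1 ++ [y], PySem.Set.add qs.2 y)) (q, s) =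
        (q ++ pvNews s l, s ++ pvNews s l) := by
  intro l
  induction l with
  | nil => intro q s; simp [pvNews]
  | cons y l ih =>
    intro q s
    rw [List.foldl_cons, pvNews]
    by_cases h : y ∈ s
    · simp [h, ih]
    · simp only [h, if_false, pvSet_add_of_not_mem s y h, ih]
      simp [List.append_assoc]

theorem pvNews_sub (s l : List String) : ∀ x ∈ pvNews s l, x ∈ l ∧ x ∉ s := by
  induction l generalizing s with
  | nil => simp [pvNews]
  | cons y l ih =>
    intro x hx
    rw [pvNews] at hx
    by_cases h : y ∈ s
    · rw [if_pos h] at hx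
      obtain ⟨h1, h2⟩ := ih s x hx
      exact ⟨by simp [h1], h2⟩
    · rw [if_neg h] at hx
      rcases List.mem_cons.mp hx with rfl | hx
      · exact ⟨by simp, h⟩
      · obtain ⟨h1, h2⟩ := ih (s ++ [y]) x hx
        exact ⟨by simp [h1], fun hs => h2 (List.mem_append.mpr (Or.inl hs))⟩

theorem pvNews_mem (s l : List String) : ∀ x ∈ l, x ∈ s ∨ x ∈ pvNews s l := by
  induction l generalizing s with
  | nil => simp
  | cons y l ih =>
    intro x hx
    rw [pvNews]
    by_cases h : y ∈ s
    · rw [if_pos h]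
      rcases List.mem_cons.mp hx with rfl | hx
      · exact Or.inl h
      · exact ih s x hx
    · rw [if_neg h]
      rcases List.mem_cons.mp hx with rfl | hx
      · exact Or.inr (by simp)
      · rcases ih (s ++ [y]) x hx with h2 | h2
        · rcases List.mem_append.mp h2 with h3 | h3
          · exact Or.inl h3
          · exact Or.inr (by simp at h3; simp [h3])
        · exact Or.inr (by simp [h2])

theorem pvNews_nodup (s l : List String) (h : s.Nodup) : (s ++ pvNews s l).Nodup := by
  induction l generalizing s with
  | nil => simpa [pvNews]
  | cons y l ih =>
    rw [pvNews]
    by_cases hy : y ∈ s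
    · rw [if_pos hy]; exact ih s h
    · rw [if_neg hy]
      have := ih (s ++ [y])
        (by simp [List.nodup_append, h]; exact fun a ha hay => hy (hay ▸ ha))
      simpa [List.append_assoc] using this

-- master lemma for B's loop
theorem pvGoB_master (children : List (String × List String)) (m : List String)
    (c0 : List (String × Bool)) (node : String) :
    ∀ n (q seen : List String),
      (∀ x ∈ q, pvRF children m c0 node x) →
      (∀ x ∈ q, x ∈ seen) →
      node ∈ seen →
      (∀ z ∈ seen, z ∉ q → pvDone children m c0 seen z) →
      (∀ x ∈ seen, x ∈ pvUniverse node children) →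
      seen.Nodup →
      q.length + (pvUniverse node children).dedup.length < n + seen.length →
      ∃ b, pvGoB children m c0 n q seen = some b ∧
        (b = true ↔ pvRP children m c0 node) := by
  intro n
  induction n with
  | zero =>
    intro q seen _ _ _ _ hsU hnd hlen
    exfalso
    have h1 : seen.length ≤ (pvUniverse node children).dedup.length := by
      have : seen.toFinset.card ≤ (pvUniverse node children).toFinset.card := by
        apply Finset.card_le_card
        intro x hx
        simp only [List.mem_toFinset] at hx ⊢
        exact hsU x hx
      rwa [List.toFinset_card_of_nodup hnd, List.card_toFinset] at this
    omega
  | succ n ih =>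
    intro q seen hrf hqs hns hdone hsU hnd hlen
    cases q with
    | nil =>
      refine ⟨false, by rw [pvGoB], ?_⟩
      simp only [Bool.false_eq_true, false_iff]
      intro hrp
      obtain ⟨x, hx, _⟩ :=
        pvSeen_escape children m c0 seen [] hdone node hrp hns
      simp at hx
    | cons x rest =>
      rw [pvGoB]
      cases hc : pvGet? c0 x with
      | some b =>
        cases b with
        | true =>
          refine ⟨true, by simp, ?_⟩
          simp only [true_iff]
          exact pvRF_RP children m c0 node x (hrf x (by simp)) (pvRP.hit x hc)
        | false =>
          simp only [Bool.false_eq_true, if_false]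
          refine ih rest seen (fun z hz => hrf z (by simp [hz]))
            (fun z hz => hqs z (by simp [hz])) hns ?_ hsU hnd (by simp at hlen ⊢; omega)
          intro z hz hzq
          by_cases hzx : z = x
          · exact Or.inl (hzx ▸ hc)
          · exact hdone z hz (by simp [hzx, hzq])
      | none =>
        by_cases hm : x ∈ m
        · refine ⟨true, by simp [hm], ?_⟩
          simp only [true_iff]
          exact pvRF_RP children m c0 node x (hrf x (by simp)) (pvRP.mat x hc hm)
        · simp only [hm, if_false]
          rw [pvFold_eq]
          have hrfx : pvRF children m c0 node x := hrf x (by simp)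
          set l := pvChildren children x with hl
          set nw := pvNews seen l with hnw
          have hlU : ∀ y ∈ l, y ∈ pvUniverse node children := by
            intro y hy
            rw [hl, pvChildren] at hy
            cases hfind : pvGet? children x with
            | none => rw [hfind] at hy; simp at hy
            | some cs =>
              rw [hfind] at hy
              simp only [Option.getD_some] at hy
              rw [pvGet?] at hfind
              cases hf2 : children.find? (fun p => p.1 == x) with
              | none => rw [hf2] at hfind; simp at hfind
              | some pr =>
                rw [hf2] at hfind
                simp only [Option.map_some] at hfind
                have hpr := List.mem_of_find?_eq_some hf2
                rw [pvUniverse]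
                right
                refine List.mem_flatMap.mpr ⟨pr, hpr, ?_⟩
                cases hfind
                exact hy
          refine ih (rest ++ nw) (seen ++ nw) ?_ ?_ (by simp [hns]) ?_ ?_ ?_ ?_
          · intro z hz
            rcases List.mem_append.mp hz with hz | hz
            · exact hrf z (by simp [hz])
            · exact pvRF.step x z hrfx hc hm ((pvNews_sub seen l z hz).1)
          · intro z hz
            rcases List.mem_append.mp hz with hz | hz
            · exact List.mem_append.mpr (Or.inl (hqs z (by simp [hz])))
            · exact List.mem_append.mpr (Or.inr hz)
          · intro z hz hzq
            rcases List.mem_append.mp hz with hz | hz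
            · by_cases hzx : z = x
              · subst hzx
                right
                refine ⟨hc, hm, ?_⟩
                intro y hy
                rcases pvNews_mem seen l y hy with h | h
                · exact List.mem_append.mpr (Or.inl h)
                · exact List.mem_append.mpr (Or.inr h)
              · have hznr : z ∉ rest := fun h => hzq (List.mem_append.mpr (Or.inl h))
                have := hdone z hz (by simp [hzx, hznr])
                rcases this with h | ⟨h1, h2, h3⟩
                · exact Or.inl h
                · exact Or.inr ⟨h1, h2, fun y hy => List.mem_append.mpr (Or.inl (h3 y hy))⟩
            · exact absurd (List.mem_append.mpr (Or.inr hz)) hzq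
          · intro z hz
            rcases List.mem_append.mp hz with hz | hz
            · exact hsU z hz
            · exact hlU z ((pvNews_sub seen l z hz).1)
          · exact pvNews_nodup seen l hnd
          · simp only [List.length_append, List.length_cons] at hlen ⊢
            omega

-- witness for the claim that the empty-fuel cases are unreachable at top level
theorem pvGoB_top (children : List (String × List String)) (m : List String)
    (cache : List (String × Bool)) (node : String) (hc : pvGet? cache node = none) :
    ∃ b, pvGoB children m cache ((pvUniverse node children).length + 1)
        [node] (PySem.Set.ofList [node]) = some b ∧
      (b = true ↔ pvRP children m cache node) := by
  have hof : PySem.Set.ofList [node] = [node] := by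
    simp [PySem.Set.ofList, PySem.Set.add, PySem.Set.contains]
  rw [hof]
  refine pvGoB_master children m cache node _ [node] [node]
    (by intro x hx; simp at hx; subst hx; exact pvRF.base)
    (by intro x hx; exact hx) (by simp) (by intro z hz hzq; simp at hz; simp [hz] at hzq)
    (by intro x hx; simp at hx; simp [hx, pvUniverse]) (by simp) ?_
  have := List.dedup_sublist (pvUniverse node children)
  have hle : (pvUniverse node children).dedup.length ≤ (pvUniverse node children).length :=
    this.length_le
  omega

-- ===== VERDICT (by name: the statement is the Claim_ definition above) =====
theorem should_display_py_spec : Claim_equal_should_display_py := by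
  intro node children matched cache _ hpre
  unfold Spec_should_display_py should_display_py should_display_py_alt
  cases hmat : matched with
  | none => simp
  | some m =>
    simp only []
    cases hc : pvGet? cache node with
    | some b =>
      -- both sides read the cached value
      have : pvGoA children m (children.length + 1) cache node = some (b, cache) := by
        rw [pvGoA, hc]
      rw [this]
    | none =>
      rcases hpre with h | h | h | h
      · rw [hmat] at h; cases h
      · rw [hc] at h; simp at h
      · -- node itself matched: both sides answer true in one step
        rw [hmat] at h
        simp only [Option.getD_some] at h
        have hA : pvGoA children m (children.length + 1) cache node =
            some (true, (node, true) :: cache) := by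
          rw [pvGoA, hc]; simp [h]
        have hB : pvGoB children m cache ((pvUniverse node children).length + 1)
            [node] (PySem.Set.ofList [node]) = some true := by
          have hof : PySem.Set.ofList [node] = [node] := by
            simp [PySem.Set.ofList, PySem.Set.add, PySem.Set.contains]
          rw [hof, pvGoB, hc]; simp [h]
        rw [hA, hB]
      · -- acyclic reachable region: both sides decide pvRP
        obtain ⟨bA, c', hA, _, _, htA, hfA⟩ :=
          pvGoA_master children m cache (children.length + 1) cache node h
            (pvSound_self children m cache) ⟨[], rfl⟩
        obtain ⟨bB, hB, hiffB⟩ := pvGoB_top children m cache node hc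
        rw [hA, hB]
        cases bA with
        | true => exact (hiffB.mpr (htA rfl)).symm
        | false =>
          cases bB with
          | true => exact absurd (hiffB.mp rfl) (hfA rfl)
          | false => rfl
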